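-- pv_equiv track=rewrite | github.com/alanbiju78/tcs_2025_codevita | Solution B.py | convert
-- ===== SOURCE A (Python) =====
-- dict1={
--     ((1,),(1,1),(0,),(1,1),(1,)):0,
--     ((0,),(0,1),(0,),(0,1),(0,)):1,
--     ((1,),(0,1),(1,),(1,0),(1,)):2,
--     ((1,),(0,1),(1,),(0,1),(1,)):3,
--     ((0,),(1,1),(1,),(0,1),(0,)):4,
--     ((1,),(1,0),(1,),(0,1),(1,)):5,
--     ((1,),(1,0),(1,),(1,1),(1,)):6,
--     ((1,),(0,1),(0,),(0,1),(0,)):7,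
--     ((1,),(1,1),(1,),(1,1),(1,)):8,
--     ((1,),(1,1),(1,),(0,1),(1,)):9
-- }
--
-- dict1_inv={v:k for k,v in dict1.items()}
--
-- def convert(digit,dir_seq):
--     befmir=dict1_inv[int(digit)]
--     if dir_seq=='U' or dir_seq=='D':
--         aftmir=befmir[::-1]
--
--     elif dir_seq=='L' or dir_seq=='R':
--         aftmir=tuple(tuple(row[::-1]) for row in befmir)
--
--     elif dir_seq=='N' or dir_seq=='S':
--         aftmir=befmir
--
--     return dict1.get(aftmir)
-- ===== SOURCE B (Python) =====
-- # Precomputed (digit, direction-class) table: one direct lookup instead of encode-mirror-decode.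
-- _VERT  = [0, 1, 5, 3, None, 2, None, None, 8, None]   # flip rows (U/D)
-- _HORIZ = [0, None, 5, None, None, 2, None, None, 8, None]  # flip each row (L/R)
--
-- def convert(digit, dir_seq):
--     d = int(digit)
--     if dir_seq == 'U' or dir_seq == 'D':
--         res = _VERT[d]
--     elif dir_seq == 'L' or dir_seq == 'R':
--         res = _HORIZ[d]
--     elif dir_seq == 'N' or dir_seq == 'S':
--         res = d
--     return res
-- ===== Notes on version B (the rewrite author's own statement) =====
-- stated objective: simpler
-- what changed: Replaces the encode-mirror-decode pipeline (inverse dict lookup, tuple reversal, forward dict lookup) with two precomputed digit->result tables indexed directly by the digit.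
import Mathlib
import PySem

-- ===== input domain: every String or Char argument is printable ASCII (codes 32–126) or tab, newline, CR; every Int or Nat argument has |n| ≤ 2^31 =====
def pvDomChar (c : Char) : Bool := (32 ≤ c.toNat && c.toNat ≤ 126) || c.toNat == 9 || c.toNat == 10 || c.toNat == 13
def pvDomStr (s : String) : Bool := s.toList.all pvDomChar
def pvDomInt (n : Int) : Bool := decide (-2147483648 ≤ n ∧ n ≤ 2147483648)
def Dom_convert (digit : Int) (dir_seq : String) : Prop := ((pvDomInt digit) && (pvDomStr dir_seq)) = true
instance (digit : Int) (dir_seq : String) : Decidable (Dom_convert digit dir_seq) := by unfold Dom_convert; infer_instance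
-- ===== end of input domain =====

-- B replaces A's encode/mirror/decode dictionaries with two precomputed digit-indexed tables (objective: simpler).

-- ===== PORT A =====
def dict1 : PySem.Dict (List (List Int)) Int := PySem.Dict.ofList [
  ([[1],[1,1],[0],[1,1],[1]], 0),
  ([[0],[0,1],[0],[0,1],[0]], 1),
  ([[1],[0,1],[1],[1,0],[1]], 2),
  ([[1],[0,1],[1],[0,1],[1]], 3),
  ([[0],[1,1],[1],[0,1],[0]], 4),
  ([[1],[1,0],[1],[0,1],[1]], 5),
  ([[1],[1,0],[1],[1,1],[1]], 6),
  ([[1],[0,1],[0],[0,1],[0]], 7),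
  ([[1],[1,1],[1],[1,1],[1]], 8),
  ([[1],[1,1],[1],[0,1],[1]], 9)]

def dict1_inv : PySem.Dict Int (List (List Int)) :=
  dict1.items.foldl (fun d p => d.insert p.2 p.1) PySem.Dict.empty

def convert (digit : Int) (dir_seq : String) : Option Int :=
  match dict1_inv.get? digit with
  | none => none   -- Python: KeyError (excluded by Pre_convert)
  | some befmir =>
    if dir_seq = "U" ∨ dir_seq = "D" then
      dict1.get? ((PySem.List.slice? befmir none none (-1)).getD [])   -- befmir[::-1]; step -1 never raises
    else if dir_seq = "L" ∨ dir_seq = "R" then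
      dict1.get? (befmir.map (fun row => (PySem.List.slice? row none none (-1)).getD []))
    else if dir_seq = "N" ∨ dir_seq = "S" then
      dict1.get? befmir
    else none   -- Python: UnboundLocalError (excluded by Pre_convert)

-- ===== PORT B =====
def vertTable : List (Option Int) :=
  [some 0, some 1, some 5, some 3, none, some 2, none, none, some 8, none]
def horizTable : List (Option Int) :=
  [some 0, none, some 5, none, none, some 2, none, none, some 8, none]

def convert_alt (digit : Int) (dir_seq : String) : Option Int :=
  if dir_seq = "U" ∨ dir_seq = "D" then
    (PySem.List.pyGet? vertTable digit).getD none   -- _VERT[d]; out of range excluded by Pre_convert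
  else if dir_seq = "L" ∨ dir_seq = "R" then
    (PySem.List.pyGet? horizTable digit).getD none
  else if dir_seq = "N" ∨ dir_seq = "S" then
    some digit
  else none   -- Python: UnboundLocalError (excluded by Pre_convert)

-- ===== PRECONDITION & SPEC =====
-- Pre_ excludes digits outside 0..9 (A raises KeyError) and direction strings other than the six
-- recognised ones (A raises UnboundLocalError).
def Pre_convert (digit : Int) (dir_seq : String) : Prop :=
  (0 ≤ digit ∧ digit ≤ 9) ∧ dir_seq ∈ ["U", "D", "L", "R", "N", "S"]
instance (digit : Int) (dir_seq : String) : Decidable (Pre_convert digit dir_seq) := by unfold Pre_convert; infer_instance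

def pvWitness_convert : Int × String := (2, "U")

def Spec_convert (digit : Int) (dir_seq : String) (out : Option Int) : Prop := out = convert_alt digit dir_seq
instance (digit : Int) (dir_seq : String) (out : Option Int) : Decidable (Spec_convert digit dir_seq out) := by unfold Spec_convert; infer_instance

-- ===== CLAIM (what is proved, stated in full; the proofs are below) =====
def Claim_equal_convert : Prop := ∀ (digit : Int) (dir_seq : String), Dom_convert digit dir_seq → Pre_convert digit dir_seq → Spec_convert digit dir_seq (convert digit dir_seq)

-- ===== LEMMAS AND PROOFS =====

-- ===== VERDICT (by name: the statement is the Claim_ definition above) =====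
theorem convert_spec : Claim_equal_convert := by
  intro digit dir_seq _ hpre
  obtain ⟨⟨h0, h9⟩, hdir⟩ := hpre
  unfold Spec_convert
  interval_cases digit <;>
    (simp only [List.mem_cons, List.not_mem_nil, or_false] at hdir;
     rcases hdir with rfl | rfl | rfl | rfl | rfl | rfl <;> decide)
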